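-- pv_equiv track=rewrite | github.com/inmyownlane/graph_algorithms | graph_eulerian.py | is_eulerian
-- ===== SOURCE A (Python) =====
-- def is_eulerian(graph):
--
--     '''
--     Checks if an undirected graph is Eulerian.
--     :param graph: A dictionary representing the adjacency list of a graph.
--     :return: True if the graph is Eulerian, False otherwise
--     '''
--
--     def is_connected(graph):
--
--         # initialising a starting node.
--         start_node = None
--
--         # iterates through each node, looking for a node that has edges
--         for node, neighbors in graph.items():
--             if neighbors:
--                 start_node = node
--                 break
--             # if there's no nodes with edges, it is trivially Eulerian.
--             if start_node is None:
--                 return True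
--
--         # Perform DFS to check for connectivity, satisfying the 1st criteria for whether a graph is Eulerian or not
--         visited = set()
--
--         def dfs(node):
--             visited.add(node)
--             for neighbor in graph[node]:
--                 if neighbor not in visited:
--                     dfs(neighbor)
--
--         dfs(start_node)
--
--         for node, neighbors in graph.items():
--             if neighbors and node not in visited:
--                 return False
--         return True
--
--     # Criteria 1) Check for connectivity of the graph
--     if not is_connected(graph):
--         return False
--
--     # Criteria 2) Check if every vertex has even degree
--     for node in graph:
--         if len(graph[node]) % 2 != 0:
--             return False
--
--     # Return True if both criterias are met
--     return True
-- ===== SOURCE B (Python) =====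
-- def is_eulerian(graph):
--     # Criterion 2 first: every vertex must have even degree.
--     for neighbors in graph.values():
--         if len(neighbors) % 2 != 0:
--             return False
--     # Criterion 1: all vertices that have edges must be mutually connected.
--     edge_nodes = [node for node, neighbors in graph.items() if neighbors]
--     if not edge_nodes:
--         return True
--     visited = {edge_nodes[0]}
--     frontier = {edge_nodes[0]}
--     # frontier BFS, driven a fixed len(graph) rounds (enough to saturate)
--     for _ in range(len(graph)):
--         frontier = {m for n in frontier for m in graph.get(n, ())} - visited
--         visited |= frontier
--     return all(node in visited for node in edge_nodes)
-- ===== Notes on version B (the rewrite author's own statement) =====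
-- stated objective: alternative
-- what changed: The recursive depth-first search (which can hit Python's recursion limit) is replaced by an iterative fixed-round frontier BFS over sets, the even-degree test runs first directly over the dict values, and the connectivity verdict is derived from the list of edge-bearing nodes instead of re-scanning items.
-- intended difference: On graphs whose first dict entry has an empty neighbor list but whose edge-bearing nodes are not all connected to the first of them (all degrees even), A returns True because its start-selection loop hits an in-loop 'return True' and skips the connectivity check, while B returns False, the intended answer: such a graph has no Euler circuit. — e.g. on is_eulerian([("a", []), ("b", ["c", "c"]), ("c", ["b", "b"]), ("d", ["e", "e"]), ("e", ["d", "d"])]): A returns true, B returns false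
import Mathlib
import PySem

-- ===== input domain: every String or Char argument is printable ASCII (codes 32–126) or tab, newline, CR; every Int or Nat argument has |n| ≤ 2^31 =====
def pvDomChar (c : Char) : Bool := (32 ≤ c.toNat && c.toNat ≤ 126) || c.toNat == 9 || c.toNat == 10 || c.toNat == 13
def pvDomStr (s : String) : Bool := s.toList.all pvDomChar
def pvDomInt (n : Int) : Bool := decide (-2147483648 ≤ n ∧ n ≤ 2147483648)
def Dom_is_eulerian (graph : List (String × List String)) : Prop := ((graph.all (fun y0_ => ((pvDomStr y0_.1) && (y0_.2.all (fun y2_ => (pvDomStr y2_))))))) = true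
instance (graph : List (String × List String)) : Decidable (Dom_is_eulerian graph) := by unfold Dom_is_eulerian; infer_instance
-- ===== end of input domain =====

-- B replaces A's recursive DFS (which can hit Python's recursion limit) by an
-- iterative fixed-round frontier BFS and checks even degrees directly on the values.

-- ===== PORT A =====

-- dict lookup graph[n], a missing key giving [] (first matching key; where A's Python
-- raises KeyError on a neighbor that is not a key, this totalised port explores no further,
-- exactly as B's graph.get(n, ()) does)
def pyAdj (g : List (String × List String)) (n : String) : List String :=
  (((g.find? (fun p => p.1 == n)).map Prod.snd).getD [])

-- A's start-selection loop. It always leaves the loop inside its first iteration: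
-- `break` with a start node, or the in-loop `return True`.
-- none = in-loop `return True`; some none = empty dict, start_node stays None
-- (Python then raises KeyError in dfs — excluded by Pre_); some (some s) = break with start s.
def startScanA (g : List (String × List String)) : Option (Option String) :=
  match g with
  | [] => some none
  | (node, nbs) :: _ => if !nbs.isEmpty then some (some node) else none

mutual
-- A's recursive dfs; `fuel` only makes the recursion structural (g.length + 1 suffices
-- under Pre_, where every reachable node is a fresh key).
def dfsA (g : List (String × List String)) : Nat → String → PySem.Set String → PySem.Set String
  | 0, _, visited => visited
  | fuel+1, node, visited => dfsGoA g fuel (pyAdj g node) (PySem.Set.add visited node)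
termination_by fuel _ _ => (fuel, 0)
-- the `for neighbor in graph[node]` loop of dfs
def dfsGoA (g : List (String × List String)) (fuel : Nat) : List String → PySem.Set String → PySem.Set String
  | [], visited => visited
  | nbr :: rest, visited =>
      dfsGoA g fuel rest (if nbr ∈ visited then visited else dfsA g fuel nbr visited)
termination_by l _ => (fuel, l.length + 1)
end

def isConnectedA (g : List (String × List String)) : Bool :=
  match startScanA g with
  | none => true
  | some none => true  -- unreachable under Pre_ (g ≠ []): Python raises KeyError on dfs(None)
  | some (some s) =>
      let visited := dfsA g (g.length + 1) s PySem.Set.empty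
      g.all (fun p => p.2.isEmpty || p.1 ∈ visited)

def is_eulerian (graph : List (String × List String)) : Bool :=
  if isConnectedA graph = false then false
  else if (graph.map Prod.fst).any (fun n => (pyAdj graph n).length % 2 != 0) then false
  else true

-- ===== PORT B =====

-- one round: frontier = {m for n in frontier for m in graph.get(n, ())} - visited; visited |= frontier
def bfsStepB (g : List (String × List String)) :
    PySem.Set String × PySem.Set String → PySem.Set String × PySem.Set String
  | (visited, frontier) =>
      let frontier' := PySem.Set.diff (PySem.Set.ofList (frontier.flatMap (pyAdj g))) visited
      (PySem.Set.union visited frontier', frontier')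

def is_eulerian_alt (graph : List (String × List String)) : Bool :=
  if graph.any (fun p => p.2.length % 2 != 0) then false
  else
    let edge_nodes := (graph.filter (fun p => !p.2.isEmpty)).map Prod.fst
    match edge_nodes with
    | [] => true
    | s :: _ =>
        let vf := (List.range graph.length).foldl (fun vf _ => bfsStepB graph vf)
          (PySem.Set.add PySem.Set.empty s, PySem.Set.add PySem.Set.empty s)
        edge_nodes.all (fun n => n ∈ vf.1)

-- ===== PRECONDITION & SPEC =====

-- helper for the change region D_: saturation reachability (one round per key)
def reachD (g : List (String × List String)) (s : String) : List String :=
  (fun S => PySem.List.dedup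
    (S ++ (g.filter fun p => p.1 ∈ S).flatMap Prod.snd))^[g.length] [s]

-- reachable-name saturation with early exit, used only by Pre_ (one round per fuel unit;
-- graph.length rounds always suffice)
def reachFix (g : List (String × List String)) : Nat → List String → List String
  | 0, S => S
  | f+1, S =>
      let T := PySem.List.dedup (((g.filter fun p => p.1 ∈ S).flatMap Prod.snd).filter
        fun m => !(m ∈ S : Bool))
      if T = [] then S else reachFix g f (S ++ T)

-- Pre_ excludes the empty dict (A's dfs(None) raises KeyError), association lists with
-- duplicate keys (they cannot arise from a Python dict), and graphs whose first entry has
-- neighbors and whose reachable part mentions a name that is not a key (A's dfs raises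
-- KeyError exactly there; with an empty first entry A never runs its dfs).
def Pre_is_eulerian (graph : List (String × List String)) : Prop :=
  graph ≠ [] ∧ (graph.map Prod.fst).Nodup ∧
  ∀ q ∈ graph.head?, q.2 ≠ [] → ∀ x ∈ reachFix graph graph.length [q.1], x ∈ graph.map Prod.fst

instance (graph : List (String × List String)) : Decidable (Pre_is_eulerian graph) := by
  unfold Pre_is_eulerian; infer_instance

def pvWitness_is_eulerian : (List (String × List String)) := [("a", ["a", "a"])]

-- On graphs whose FIRST dict entry has no neighbors but whose nodes with edges are not all
-- connected (all degrees even), A returns True — its start-selection loop hits the in-loop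
-- `return True` and skips the connectivity check entirely — while B returns False, the
-- intended answer: a graph with two separate edge components has no Euler circuit.
def D_is_eulerian (graph : List (String × List String)) : Prop :=
  graph.head?.map Prod.snd = some [] ∧ (∀ p ∈ graph, p.2.length % 2 = 0) ∧
  ∃ p ∈ graph, ∃ q ∈ graph.find? fun r => !r.2.isEmpty, p.2 ≠ [] ∧ p.1 ∉ reachD graph q.1

instance (graph : List (String × List String)) : Decidable (D_is_eulerian graph) := by
  unfold D_is_eulerian; infer_instance

def Spec_is_eulerian (graph : List (String × List String)) (out : Bool) : Prop :=
  ¬ D_is_eulerian graph → out = is_eulerian_alt graph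
instance (graph : List (String × List String)) (out : Bool) : Decidable (Spec_is_eulerian graph out) := by
  unfold Spec_is_eulerian; infer_instance

def pvDiffWitness_is_eulerian : (List (String × List String)) :=
  [("a", []), ("b", ["c", "c"]), ("c", ["b", "b"]), ("d", ["e", "e"]), ("e", ["d", "d"])]

def pvDiffWitnessOut_is_eulerian : Bool × Bool := (true, false)

-- ===== CLAIM (what is proved, stated in full; the proofs are below) =====
def Claim_unchanged_is_eulerian : Prop := ∀ (graph : List (String × List String)), Dom_is_eulerian graph → Pre_is_eulerian graph → Spec_is_eulerian graph (is_eulerian graph)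
def Claim_changed_is_eulerian : Prop := Dom_is_eulerian (pvDiffWitness_is_eulerian) ∧ Pre_is_eulerian (pvDiffWitness_is_eulerian) ∧ D_is_eulerian (pvDiffWitness_is_eulerian) ∧ is_eulerian (pvDiffWitness_is_eulerian) = pvDiffWitnessOut_is_eulerian.1 ∧ is_eulerian_alt (pvDiffWitness_is_eulerian) = pvDiffWitnessOut_is_eulerian.2 ∧ pvDiffWitnessOut_is_eulerian.1 ≠ pvDiffWitnessOut_is_eulerian.2
def Claim_exact_is_eulerian : Prop := ∀ (graph : List (String × List String)), Dom_is_eulerian graph → Pre_is_eulerian graph → D_is_eulerian graph → is_eulerian graph ≠ is_eulerian_alt graph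

-- ===== LEMMAS AND PROOFS =====

-- `x is reachable from s in at most k steps` — the common yardstick for A's dfs,
-- B's frontier BFS and D_'s plain saturation
def satP (g : List (String × List String)) (s : String) : Nat → String → Prop
  | 0, x => x = s
  | k+1, x => satP g s k x ∨ ∃ n, satP g s k n ∧ x ∈ pyAdj g n

theorem pyAdj_mem_pair (g : List (String × List String)) (n x : String)
    (hx : x ∈ pyAdj g n) : ∃ p ∈ g, p.1 = n ∧ x ∈ p.2 := by
  unfold pyAdj at hx
  cases hfind : g.find? (fun p => p.1 == n) with
  | none => rw [hfind] at hx; simp at hx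
  | some p =>
      rw [hfind] at hx; simp at hx
      have hpn : p.1 = n := by simpa using List.find?_some hfind
      exact ⟨p, List.mem_of_find?_eq_some hfind, hpn, hx⟩

theorem pyAdj_eq_of_mem (g : List (String × List String))
    (hnd : (g.map Prod.fst).Nodup) (p : String × List String) (hp : p ∈ g) :
    pyAdj g p.1 = p.2 := by
  induction g with
  | nil => simp at hp
  | cons q t ih =>
      simp only [List.map_cons, List.nodup_cons] at hnd
      rcases List.mem_cons.1 hp with rfl | hp'
      · unfold pyAdj; simp [List.find?]
      · unfold pyAdj
        simp only [List.find?]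
        have hne : (q.1 == p.1) = false := by
          simp only [beq_eq_false_iff_ne]
          intro h
          exact hnd.1 (h ▸ (List.mem_map.2 ⟨p, hp', rfl⟩))
        rw [hne]
        exact ih hnd.2 hp'

def iterN {α : Type} (f : α → α) : Nat → α → α
  | 0, a => a
  | k+1, a => f (iterN f k a)

theorem foldl_range_eq_iterN {α : Type} (f : α → α) (k : Nat) (init : α) :
    (List.range k).foldl (fun a _ => f a) init = iterN f k init := by
  induction k with
  | zero => rfl
  | succ k ih => rw [List.range_succ, List.foldl_append, ih]; rfl

theorem satP_self (g : List (String × List String)) (s : String) (k : Nat) :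
    satP g s k s := by
  induction k with
  | zero => rfl
  | succ k ih => exact Or.inl ih

def stepD (g : List (String × List String)) (S : List String) : List String :=
  PySem.List.dedup (S ++ (g.filter fun p => p.1 ∈ S).flatMap Prod.snd)

def Dst (g : List (String × List String)) (s : String) (j : Nat) : List String :=
  (stepD g)^[j] [s]

theorem reachD_eq_Dst (g : List (String × List String)) (s : String) :
    reachD g s = Dst g s g.length := rfl

theorem Dst_succ (g : List (String × List String)) (s : String) (j : Nat) :
    Dst g s (j+1) = stepD g (Dst g s j) := Function.iterate_succ_apply' _ _ _

theorem Dst_inv (g : List (String × List String)) (hnd : (g.map Prod.fst).Nodup)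
    (s : String) (j : Nat) (x : String) :
    x ∈ Dst g s j ↔ satP g s j x := by
  induction j generalizing x with
  | zero => unfold Dst; simp [satP, eq_comm]
  | succ j ih =>
      rw [Dst_succ]
      unfold stepD
      rw [PySem.List.mem_dedup, List.mem_append, List.mem_flatMap]
      constructor
      · intro h
        rcases h with h | ⟨p, hp, hm⟩
        · exact Or.inl ((ih x).1 h)
        · rcases List.mem_filter.1 hp with ⟨hpg, hpS⟩
          refine Or.inr ⟨p.1, (ih p.1).1 (by simpa using hpS), ?_⟩
          rw [pyAdj_eq_of_mem g hnd p hpg]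
          exact hm
      · intro h
        rcases h with h | ⟨n, hn, hm⟩
        · exact Or.inl ((ih x).2 h)
        · rcases pyAdj_mem_pair g n x hm with ⟨p, hpg, hpn, hxp⟩
          refine Or.inr ⟨p, List.mem_filter.2 ⟨hpg, ?_⟩, hxp⟩
          simp only [decide_eq_true_iff, hpn]
          exact (ih n).2 hn

theorem key_of_mem_adj (g : List (String × List String)) (n x : String)
    (hx : x ∈ pyAdj g n) : n ∈ g.map Prod.fst := by
  rcases pyAdj_mem_pair g n x hx with ⟨p, hpg, hpn, -⟩
  exact hpn ▸ List.mem_map.2 ⟨p, hpg, rfl⟩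

theorem adj_of_not_key (g : List (String × List String)) (n : String)
    (hn : n ∉ g.map Prod.fst) : pyAdj g n = [] := by
  cases hx : pyAdj g n with
  | nil => rfl
  | cons m r =>
      exact absurd (key_of_mem_adj g n m (by rw [hx]; exact List.mem_cons_self)) hn

theorem satP_new_key (g : List (String × List String)) (s : String) (j : Nat) (x : String)
    (hx1 : satP g s (j+1) x) (hx0 : ¬ satP g s j x) :
    ∃ n, n ∈ g.map Prod.fst ∧ satP g s j n ∧ x ∈ pyAdj g n := by
  rcases hx1 with h | ⟨n, hn, hm⟩
  · exact absurd h hx0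
  · exact ⟨n, key_of_mem_adj g n x hm, hn, hm⟩

theorem satP_chain (g : List (String × List String)) (s : String)
    (hsK : s ∈ g.map Prod.fst) :
    ∀ j, (∃ x, satP g s (j+1) x ∧ ¬ satP g s j x) →
      ∃ L : List String, L.Nodup ∧ L.length = j + 1 ∧
        ∀ m ∈ L, m ∈ g.map Prod.fst ∧ satP g s j m := by
  intro j
  induction j with
  | zero =>
      intro _
      refine ⟨[s], by simp, rfl, ?_⟩
      intro m hm
      have : m = s := by simpa using hm
      subst this
      exact ⟨hsK, rfl⟩
  | succ j ih =>
      rintro ⟨x, hx1, hx0⟩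
      obtain ⟨n, hnK, hn1, hm⟩ := satP_new_key g s (j+1) x hx1 hx0
      have hn0 : ¬ satP g s j n := fun h => hx0 (Or.inr ⟨n, h, hm⟩)
      obtain ⟨L, hLnd, hLlen, hLmem⟩ := ih ⟨n, hn1, hn0⟩
      refine ⟨n :: L, List.nodup_cons.2 ⟨fun hmem => hn0 (hLmem n hmem).2, hLnd⟩,
        by simp [hLlen], ?_⟩
      intro m hmem
      rcases List.mem_cons.1 hmem with rfl | hmem'
      · exact ⟨hnK, hn1⟩
      · exact ⟨(hLmem m hmem').1, Or.inl (hLmem m hmem').2⟩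

theorem satP_stab (g : List (String × List String)) (s : String)
    (hsK : s ∈ g.map Prod.fst) :
    ∀ x, satP g s (g.length + 1) x ↔ satP g s g.length x := by
  intro x
  constructor
  · intro hx
    by_contra hx0
    obtain ⟨L, hLnd, hLlen, hLmem⟩ := satP_chain g s hsK g.length ⟨x, hx, hx0⟩
    have h1 : L.toFinset.card = L.length := List.toFinset_card_of_nodup hLnd
    have h2 : L.toFinset ⊆ (g.map Prod.fst).toFinset := by
      intro y hy
      exact List.mem_toFinset.2 (hLmem y (List.mem_toFinset.1 hy)).1
    have h3 := Finset.card_le_card h2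
    have h4 := (g.map Prod.fst).toFinset_card_le
    rw [List.length_map] at h4
    omega
  · exact Or.inl

theorem satP_closed (g : List (String × List String)) (s : String)
    (hsK : s ∈ g.map Prod.fst)
    (x : String) (hx : satP g s g.length x) (m : String) (hm : m ∈ pyAdj g x) :
    satP g s g.length m := by
  exact (satP_stab g s hsK m).1 (Or.inr ⟨x, hx, hm⟩)

def Bst (g : List (String × List String)) (s : String) (j : Nat) :
    PySem.Set String × PySem.Set String :=
  iterN (bfsStepB g) j (PySem.Set.add PySem.Set.empty s, PySem.Set.add PySem.Set.empty s)

theorem B_inv (g : List (String × List String)) (s : String) (j : Nat) :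
    (∀ x, x ∈ (Bst g s j).1 ↔ satP g s j x) ∧
    (∀ x, x ∈ (Bst g s j).2 → x ∈ (Bst g s j).1) ∧
    (∀ n, n ∈ (Bst g s j).1 → n ∉ (Bst g s j).2 → ∀ m, m ∈ pyAdj g n → satP g s j m) := by
  induction j with
  | zero =>
      refine ⟨?_, fun x h => h, ?_⟩
      · intro x
        show x ∈ PySem.Set.add PySem.Set.empty s ↔ x = s
        rw [PySem.Set.mem_add]
        simp [PySem.Set.empty]
      · intro n h1 h2
        exact absurd h1 h2
  | succ j ih =>
      obtain ⟨E, S, C⟩ := ih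
      have hE : ∀ x, x ∈ (Bst g s (j+1)).1 ↔ satP g s (j+1) x := by
        intro x
        show x ∈ PySem.Set.union (Bst g s j).1
          (PySem.Set.diff (PySem.Set.ofList ((Bst g s j).2.flatMap (pyAdj g))) (Bst g s j).1) ↔ _
        rw [PySem.Set.mem_union, PySem.Set.mem_diff, PySem.Set.mem_ofList]
        constructor
        · rintro (hv | ⟨hf, -⟩)
          · exact Or.inl ((E x).1 hv)
          · rcases List.mem_flatMap.1 hf with ⟨n, hn, hm⟩
            exact Or.inr ⟨n, (E n).1 (S n hn), hm⟩
        · rintro (hx | ⟨n, hn, hm⟩)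
          · exact Or.inl ((E x).2 hx)
          · by_cases hF : n ∈ (Bst g s j).2
            · by_cases hv : x ∈ (Bst g s j).1
              · exact Or.inl hv
              · exact Or.inr ⟨List.mem_flatMap.2 ⟨n, hF, hm⟩, hv⟩
            · exact Or.inl ((E x).2 (C n ((E n).2 hn) hF x hm))
      refine ⟨hE, ?_, ?_⟩
      · intro x hx
        show x ∈ PySem.Set.union _ _
        rw [PySem.Set.mem_union]
        exact Or.inr hx
      · intro n hn hnF m hm
        have hn' : n ∈ (Bst g s j).1 ∨
            (n ∈ (Bst g s j).2.flatMap (pyAdj g) ∧ n ∉ (Bst g s j).1) := by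
          have := hn
          rw [show (Bst g s (j+1)).1 = PySem.Set.union (Bst g s j).1
            (PySem.Set.diff (PySem.Set.ofList ((Bst g s j).2.flatMap (pyAdj g))) (Bst g s j).1) from rfl,
            PySem.Set.mem_union, PySem.Set.mem_diff, PySem.Set.mem_ofList] at this
          exact this
        rcases hn' with hv | ⟨hf, hnv⟩
        · by_cases hF : n ∈ (Bst g s j).2
          · refine Or.inr ⟨n, (E n).1 hv, hm⟩
          · exact Or.inl (C n hv hF m hm)
        · exfalso
          apply hnF
          show n ∈ PySem.Set.diff (PySem.Set.ofList ((Bst g s j).2.flatMap (pyAdj g))) (Bst g s j).1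
          rw [PySem.Set.mem_diff, PySem.Set.mem_ofList]
          exact ⟨hf, hnv⟩

-- measure for A's dfs: number of keys not yet visited (proof-only)
def mfree (g : List (String × List String)) (v : List String) : Nat :=
  ((g.map Prod.fst).toFinset \ v.toFinset).card

theorem mfree_pos (g : List (String × List String)) (v : List String) (n : String)
    (hK : n ∈ g.map Prod.fst) (hv : n ∉ v) : 1 ≤ mfree g v := by
  refine Finset.card_pos.2 ⟨n, ?_⟩
  rw [Finset.mem_sdiff, List.mem_toFinset, List.mem_toFinset]
  exact ⟨hK, hv⟩

theorem mfree_add (g : List (String × List String)) (v : PySem.Set String) (n : String)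
    (hK : n ∈ g.map Prod.fst) (hv : n ∉ v) :
    mfree g (PySem.Set.add v n) + 1 = mfree g v := by
  unfold mfree
  have ht : (PySem.Set.add v n).toFinset = insert n v.toFinset := by
    ext y
    rw [List.mem_toFinset, PySem.Set.mem_add, Finset.mem_insert, List.mem_toFinset, or_comm]
  rw [ht, Finset.sdiff_insert, Finset.card_erase_of_mem
    (Finset.mem_sdiff.2 ⟨List.mem_toFinset.2 hK, fun h => hv (List.mem_toFinset.1 h)⟩)]
  have := mfree_pos g v n hK hv
  unfold mfree at this
  omega

theorem mfree_anti (g : List (String × List String)) (v w : List String)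
    (h : ∀ x, x ∈ v → x ∈ w) : mfree g w ≤ mfree g v := by
  refine Finset.card_le_card ?_
  intro y hy
  rw [Finset.mem_sdiff, List.mem_toFinset, List.mem_toFinset] at *
  exact ⟨hy.1, fun hw => hy.2 (h y hw)⟩

theorem dfsA_zero (g : List (String × List String)) (n : String) (v : PySem.Set String) :
    dfsA g 0 n v = v := by rw [dfsA]
theorem dfsA_succ (g : List (String × List String)) (f : Nat) (n : String) (v : PySem.Set String) :
    dfsA g (f+1) n v = dfsGoA g f (pyAdj g n) (PySem.Set.add v n) := by rw [dfsA]
theorem dfsGoA_nil (g : List (String × List String)) (f : Nat) (v : PySem.Set String) :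
    dfsGoA g f [] v = v := by rw [dfsGoA]
theorem dfsGoA_cons (g : List (String × List String)) (f : Nat) (nbr : String)
    (rest : List String) (v : PySem.Set String) :
    dfsGoA g f (nbr :: rest) v = dfsGoA g f rest (if nbr ∈ v then v else dfsA g f nbr v) := by
  rw [dfsGoA]

theorem go_mono (g : List (String × List String)) (f : Nat)
    (hA : ∀ (n : String) (v : PySem.Set String) (x : String), x ∈ v → x ∈ dfsA g f n v) :
    ∀ (l : List String) (v : PySem.Set String) (x : String), x ∈ v → x ∈ dfsGoA g f l v := by
  intro l
  induction l with
  | nil => intro v x hx; rw [dfsGoA_nil]; exact hx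
  | cons nbr rest ih =>
      intro v x hx
      rw [dfsGoA_cons]
      apply ih
      split
      · exact hx
      · exact hA nbr v x hx

theorem dfsA_mono (g : List (String × List String)) :
    ∀ (f : Nat) (n : String) (v : PySem.Set String) (x : String), x ∈ v → x ∈ dfsA g f n v := by
  intro f
  induction f with
  | zero => intro n v x hx; rw [dfsA_zero]; exact hx
  | succ f ih =>
      intro n v x hx
      rw [dfsA_succ]
      exact go_mono g f ih (pyAdj g n) _ x ((PySem.Set.mem_add _ _ _).2 (Or.inl hx))

theorem dfs_self' (g : List (String × List String)) (f : Nat) (hf : 1 ≤ f)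
    (n : String) (v : PySem.Set String) : n ∈ dfsA g f n v := by
  cases f with
  | zero => omega
  | succ f =>
      rw [dfsA_succ]
      exact go_mono g f (dfsA_mono g f) _ _ n ((PySem.Set.mem_add _ _ _).2 (Or.inr rfl))

theorem go_sound (g : List (String × List String)) (C : String → Prop) (f : Nat)
    (hA : ∀ (n : String) (v : PySem.Set String), C n → (∀ y ∈ v, C y) →
      ∀ x ∈ dfsA g f n v, C x) :
    ∀ (l : List String) (v : PySem.Set String), (∀ m ∈ l, C m) → (∀ y ∈ v, C y) →
      ∀ x ∈ dfsGoA g f l v, C x := by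
  intro l
  induction l with
  | nil => intro v _ hv x hx; rw [dfsGoA_nil] at hx; exact hv x hx
  | cons nbr rest ih =>
      intro v hl hv x hx
      rw [dfsGoA_cons] at hx
      refine ih _ (fun m hm => hl m (List.mem_cons_of_mem _ hm)) ?_ x hx
      intro y hy
      revert hy
      split
      · exact hv y
      · exact hA nbr v (hl nbr List.mem_cons_self) hv y

theorem dfsA_sound (g : List (String × List String)) (C : String → Prop)
    (hC : ∀ x, C x → ∀ m ∈ pyAdj g x, C m) :
    ∀ (f : Nat) (n : String) (v : PySem.Set String), C n → (∀ y ∈ v, C y) →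
      ∀ x ∈ dfsA g f n v, C x := by
  intro f
  induction f with
  | zero => intro n v _ hv x hx; rw [dfsA_zero] at hx; exact hv x hx
  | succ f ih =>
      intro n v hn hv x hx
      rw [dfsA_succ] at hx
      refine go_sound g C f ih (pyAdj g n) _ (hC n hn) ?_ x hx
      intro y hy
      rcases (PySem.Set.mem_add _ _ _).1 hy with h | rfl
      · exact hv y h
      · exact hn

theorem go_closure (g : List (String × List String)) (f : Nat)
    (hA : ∀ (n : String) (v : PySem.Set String), n ∈ g.map Prod.fst → n ∉ v → mfree g v < f →
       ∀ x, x ∈ dfsA g f n v → x ∉ v → ∀ m ∈ pyAdj g x, m ∈ dfsA g f n v) :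
    ∀ (l : List String) (v : PySem.Set String), mfree g v < f →
       (∀ x, x ∈ dfsGoA g f l v → x ∉ v → ∀ m ∈ pyAdj g x, m ∈ dfsGoA g f l v) ∧
       (∀ m ∈ l, m ∈ dfsGoA g f l v) := by
  intro l
  induction l with
  | nil =>
      intro v _
      rw [dfsGoA_nil]
      exact ⟨fun x hx hxv => absurd hx hxv, fun m hm => absurd hm List.not_mem_nil⟩
  | cons nbr rest ih =>
      intro v hv
      have hf1 : 1 ≤ f := by omega
      set w : PySem.Set String := if nbr ∈ v then v else dfsA g f nbr v with hw
      have hvw : ∀ x, x ∈ v → x ∈ w := by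
        intro x hx
        rw [hw]; split
        · exact hx
        · exact dfsA_mono g f nbr v x hx
      have hmw : mfree g w ≤ mfree g v := mfree_anti g v w hvw
      have hrest := ih w (by omega)
      have hres : dfsGoA g f (nbr :: rest) v = dfsGoA g f rest w := by
        rw [dfsGoA_cons, hw]
      have hwres : ∀ x, x ∈ w → x ∈ dfsGoA g f rest w :=
        fun x hx => go_mono g f (dfsA_mono g f) rest w x hx
      have hnbrw : nbr ∈ w := by
        rw [hw]
        split
        · assumption
        · exact dfs_self' g f hf1 nbr v
      have hclosw : ∀ x, x ∈ w → x ∉ v → ∀ m ∈ pyAdj g x, m ∈ w := by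
        intro x hx hxv m hm
        rw [hw] at hx ⊢
        revert hx
        split
        · exact fun hx => absurd hx hxv
        · rename_i hnv
          by_cases hnbrK : nbr ∈ g.map Prod.fst
          · exact fun hx => hA nbr v hnbrK hnv hv x hx hxv m hm
          · intro hx
            have hleaf : dfsA g f nbr v = PySem.Set.add v nbr := by
              obtain ⟨f', rfl⟩ : ∃ f', f = f' + 1 := ⟨f - 1, by omega⟩
              rw [dfsA_succ, adj_of_not_key g nbr hnbrK, dfsGoA_nil]
            rw [hleaf] at hx
            rcases (PySem.Set.mem_add _ _ _).1 hx with h | rfl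
            · exact absurd h hxv
            · rw [adj_of_not_key g x hnbrK] at hm
              exact absurd hm List.not_mem_nil
      constructor
      · intro x hx hxv m hm
        rw [hres] at hx ⊢
        by_cases hxw : x ∈ w
        · exact hwres m (hclosw x hxw hxv m hm)
        · exact (hrest.1) x hx hxw m hm
      · intro m hm
        rw [hres]
        rcases List.mem_cons.1 hm with rfl | hm'
        · exact hwres m hnbrw
        · exact (hrest.2) m hm'

theorem dfsA_closure (g : List (String × List String)) :
    ∀ (f : Nat) (n : String) (v : PySem.Set String), n ∈ g.map Prod.fst → n ∉ v → mfree g v < f →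
       ∀ x, x ∈ dfsA g f n v → x ∉ v → ∀ m ∈ pyAdj g x, m ∈ dfsA g f n v := by
  intro f
  induction f with
  | zero => intro n v _ _ h; exact absurd h (Nat.not_lt_zero _)
  | succ f ih =>
      intro n v hK hv hm x hx hxv m hmm
      have hv' : mfree g (PySem.Set.add v n) < f := by
        have := mfree_add g v n hK hv
        omega
      have hGoA := go_closure g f ih (pyAdj g n) (PySem.Set.add v n) hv'
      rw [dfsA_succ] at hx ⊢
      by_cases hxa : x ∈ PySem.Set.add v n
      · rcases (PySem.Set.mem_add _ _ _).1 hxa with h | rfl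
        · exact absurd h hxv
        · exact hGoA.2 m hmm
      · exact hGoA.1 x hx hxa m hmm

theorem dfs_eq_sat (g : List (String × List String)) (s : String)
    (hs : s ∈ g.map Prod.fst) :
    ∀ x, x ∈ dfsA g (g.length + 1) s PySem.Set.empty ↔ satP g s g.length x := by
  have hmf : mfree g PySem.Set.empty < g.length + 1 := by
    unfold mfree
    have h1 : (PySem.Set.empty : List String).toFinset = ∅ := rfl
    rw [h1, Finset.sdiff_empty]
    have := (g.map Prod.fst).toFinset_card_le
    rw [List.length_map] at this
    omega
  have hempty : ∀ y : String, y ∉ (PySem.Set.empty : PySem.Set String) := by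
    intro y hy
    simp [PySem.Set.empty] at hy
  intro x
  constructor
  · intro hx
    exact dfsA_sound g (satP g s g.length) (satP_closed g s hs) (g.length + 1) s
      PySem.Set.empty (satP_self g s g.length) (fun y hy => absurd hy (hempty y)) x hx
  · have hsub : ∀ (j : Nat) (x : String), satP g s j x →
        x ∈ dfsA g (g.length + 1) s PySem.Set.empty := by
      intro j
      induction j with
      | zero =>
          intro x hx
          have : x = s := hx
          subst this
          exact dfs_self' g (g.length + 1) (by omega) x PySem.Set.empty
      | succ j ih =>
          intro x hx
          rcases hx with hx | ⟨n, hn, hm⟩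
          · exact ih x hx
          · exact dfsA_closure g (g.length + 1) s PySem.Set.empty hs
              (hempty s) hmf n (ih n hn) (hempty n) x hm
    exact hsub g.length x

theorem head_filter {α : Type} (p : α → Bool) (l : List α) :
    (l.filter p).head? = l.find? p := by
  induction l with
  | nil => rfl
  | cons a t ih =>
      by_cases h : p a = true
      · rw [List.filter_cons_of_pos h, List.find?_cons_of_pos h]; rfl
      · rw [List.filter_cons_of_neg (by simp [h]), List.find?_cons_of_neg (by simp [h])]
        exact ih

theorem evenA_iff (g : List (String × List String)) (hnd : (g.map Prod.fst).Nodup) :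
    ((g.map Prod.fst).any (fun n => (pyAdj g n).length % 2 != 0) = false) ↔
      (∀ p ∈ g, p.2.length % 2 = 0) := by
  rw [List.any_eq_false]
  constructor
  · intro h p hp
    have := h p.1 (List.mem_map.2 ⟨p, hp, rfl⟩)
    rw [pyAdj_eq_of_mem g hnd p hp] at this
    simpa using this
  · intro h n hn
    rcases List.mem_map.1 hn with ⟨p, hp, rfl⟩
    rw [pyAdj_eq_of_mem g hnd p hp]
    simpa using h p hp

theorem evenB_iff (g : List (String × List String)) :
    (g.any (fun p => p.2.length % 2 != 0) = false) ↔ (∀ p ∈ g, p.2.length % 2 = 0) := by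
  rw [List.any_eq_false]
  constructor
  · intro h p hp; simpa using h p hp
  · intro h p hp; simpa using h p hp

theorem allB_iff (g : List (String × List String)) (s : String) (V : PySem.Set String)
    (hV : ∀ x, x ∈ V ↔ satP g s g.length x) :
    (((g.filter (fun p => !p.2.isEmpty)).map Prod.fst).all (fun n => decide (n ∈ V)) = true) ↔
      ∀ p ∈ g, p.2 ≠ [] → satP g s g.length p.1 := by
  rw [List.all_eq_true]
  constructor
  · intro h p hp hpne
    have hmem : p.1 ∈ (g.filter (fun p => !p.2.isEmpty)).map Prod.fst :=
      List.mem_map.2 ⟨p, List.mem_filter.2 ⟨hp, by simpa using hpne⟩, rfl⟩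
    have := h p.1 hmem
    rw [decide_eq_true_iff] at this
    exact (hV p.1).1 this
  · intro h n hn
    rcases List.mem_map.1 hn with ⟨p, hpf, rfl⟩
    rcases List.mem_filter.1 hpf with ⟨hp, hpne⟩
    rw [decide_eq_true_iff, hV]
    exact h p hp (by simpa using hpne)

theorem B_true_iff (g : List (String × List String)) (q : String × List String)
    (hq : g.find? (fun p => !p.2.isEmpty) = some q)
    (hE : ∀ p ∈ g, p.2.length % 2 = 0) :
    (is_eulerian_alt g = true ↔ ∀ p ∈ g, p.2 ≠ [] → satP g q.1 g.length p.1) := by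
  unfold is_eulerian_alt
  have hany : g.any (fun p => p.2.length % 2 != 0) = false := (evenB_iff g).2 hE
  rw [if_neg (by rw [hany]; simp)]
  have hhead : (g.filter (fun p => !p.2.isEmpty)).head? = some q := by
    rw [head_filter]; exact hq
  obtain ⟨ft, hfe⟩ : ∃ ft, g.filter (fun p => !p.2.isEmpty) = q :: ft := by
    cases h : g.filter (fun p => !p.2.isEmpty) with
    | nil => rw [h] at hhead; simp at hhead
    | cons a ft =>
        rw [h] at hhead
        simp only [List.head?_cons, Option.some.injEq] at hhead
        subst hhead
        exact ⟨ft, rfl⟩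
  rw [hfe, List.map_cons]
  show ((q.1 :: ft.map Prod.fst).all (fun n => decide (n ∈ (_ : PySem.Set String × PySem.Set String).1)) = true) ↔ _
  rw [foldl_range_eq_iterN]
  have hB : ∀ x, x ∈ (Bst g q.1 g.length).1 ↔ satP g q.1 g.length x := (B_inv g q.1 g.length).1
  have hrw : (q.1 :: ft.map Prod.fst) = (g.filter (fun p => !p.2.isEmpty)).map Prod.fst := by
    rw [hfe, List.map_cons]
  rw [hrw]
  exact allB_iff g q.1 (Bst g q.1 g.length).1 hB

theorem A_false_of_odd (g : List (String × List String)) (hnd : (g.map Prod.fst).Nodup)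
    (hE : ¬ ∀ p ∈ g, p.2.length % 2 = 0) : is_eulerian g = false := by
  unfold is_eulerian
  split_ifs with h1 h2
  · rfl
  · rfl
  · exact absurd ((evenA_iff g hnd).1 (by simpa using h2)) hE

theorem B_false_of_odd (g : List (String × List String))
    (hE : ¬ ∀ p ∈ g, p.2.length % 2 = 0) : is_eulerian_alt g = false := by
  unfold is_eulerian_alt
  rw [if_pos]
  cases hany : g.any (fun p => p.2.length % 2 != 0) with
  | true => rfl
  | false => exact absurd ((evenB_iff g).1 hany) hE

theorem connA_nil (n0 : String) (t : List (String × List String)) :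
    isConnectedA ((n0, ([] : List String)) :: t) = true := by
  unfold isConnectedA startScanA
  simp

theorem A_true_iff_nil (n0 : String) (t : List (String × List String))
    (hnd : ((((n0, ([] : List String)) :: t)).map Prod.fst).Nodup) :
    (is_eulerian ((n0, ([] : List String)) :: t) = true ↔
      ∀ p ∈ (n0, ([] : List String)) :: t, p.2.length % 2 = 0) := by
  unfold is_eulerian
  rw [connA_nil]
  simp only [Bool.true_eq_false, if_false]
  split_ifs with h2
  · simp only [false_iff]
    intro hE
    rw [← evenA_iff _ hnd] at hE
    rw [hE] at h2
    exact absurd h2 (by simp)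
  · simp only [true_iff]
    exact (evenA_iff _ hnd).1 (by simpa using h2)

theorem A_true_iff_ne (n0 : String) (nbs0 : List String) (t : List (String × List String))
    (hne' : nbs0 ≠ [])
    (hnd : ((((n0, nbs0) :: t)).map Prod.fst).Nodup) :
    (is_eulerian ((n0, nbs0) :: t) = true ↔
      ((∀ p ∈ (n0, nbs0) :: t, p.2 ≠ [] →
          satP ((n0, nbs0) :: t) n0 ((n0, nbs0) :: t).length p.1) ∧
        ∀ p ∈ (n0, nbs0) :: t, p.2.length % 2 = 0)) := by
  have hs : n0 ∈ ((n0, nbs0) :: t).map Prod.fst := by simp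
  have hV := dfs_eq_sat ((n0, nbs0) :: t) n0 hs
  have hconn : isConnectedA ((n0, nbs0) :: t) = true ↔
      ∀ p ∈ (n0, nbs0) :: t, p.2 ≠ [] →
        satP ((n0, nbs0) :: t) n0 ((n0, nbs0) :: t).length p.1 := by
    have hscan : startScanA ((n0, nbs0) :: t) = some (some n0) := by
      show (if (!nbs0.isEmpty) = true then some (some n0) else none) = some (some n0)
      rw [if_pos (by simpa using hne')]
    unfold isConnectedA
    rw [hscan]
    show (((n0, nbs0) :: t).all (fun p => p.2.isEmpty ||
      decide (p.1 ∈ dfsA ((n0, nbs0) :: t) (((n0, nbs0) :: t).length + 1) n0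
        PySem.Set.empty))) = true ↔ _
    rw [List.all_eq_true]
    constructor
    · intro h p hp hpne
      have := h p hp
      rw [Bool.or_eq_true, decide_eq_true_iff] at this
      rcases this with h' | h'
      · exact absurd (List.isEmpty_iff.1 h') hpne
      · exact (hV p.1).1 h'
    · intro h p hp
      rw [Bool.or_eq_true, decide_eq_true_iff]
      by_cases hpe : p.2 = []
      · exact Or.inl (List.isEmpty_iff.2 hpe)
      · exact Or.inr ((hV p.1).2 (h p hp hpe))
  unfold is_eulerian
  split_ifs with h1 h2
  · simp only [false_iff]
    intro ⟨hc, _⟩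
    rw [← hconn] at hc
    rw [h1] at hc
    exact absurd hc (by simp)
  · simp only [false_iff]
    intro ⟨_, hE⟩
    rw [← evenA_iff _ hnd] at hE
    rw [hE] at h2
    exact absurd h2 (by simp)
  · simp only [true_iff]
    refine ⟨hconn.1 ?_, (evenA_iff _ hnd).1 (by simpa using h2)⟩
    cases h : isConnectedA ((n0, nbs0) :: t) with
    | true => rfl
    | false => exact absurd h h1

theorem bool_eq_of_iff {a b : Bool} (h : a = true ↔ b = true) : a = b := by
  cases a <;> cases b <;> simp_all

theorem main_unchanged (g : List (String × List String)) (hpre : Pre_is_eulerian g)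
    (hD : ¬ D_is_eulerian g) : is_eulerian g = is_eulerian_alt g := by
  obtain ⟨hne, hnd, -⟩ := hpre
  cases g with
  | nil => exact absurd rfl hne
  | cons p t =>
      obtain ⟨n0, nbs0⟩ := p
      by_cases hE : ∀ q ∈ (n0, nbs0) :: t, q.2.length % 2 = 0
      · cases nbs0 with
        | nil =>
            have hA : is_eulerian ((n0, ([] : List String)) :: t) = true :=
              (A_true_iff_nil n0 t hnd).2 hE
            cases hfind : ((n0, ([] : List String)) :: t).find? (fun p => !p.2.isEmpty) with
            | none =>
                have hfil : ((n0, ([] : List String)) :: t).filter (fun p => !p.2.isEmpty) = [] := by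
                  rw [List.filter_eq_nil_iff]
                  intro p hp
                  simpa using List.find?_eq_none.1 hfind p hp
                have hB : is_eulerian_alt ((n0, ([] : List String)) :: t) = true := by
                  unfold is_eulerian_alt
                  rw [if_neg (by rw [(evenB_iff _).2 hE]; simp), hfil]
                  rfl
                rw [hA, hB]
            | some q =>
                have hconn : ∀ p ∈ (n0, ([] : List String)) :: t, p.2 ≠ [] →
                    satP ((n0, ([] : List String)) :: t) q.1
                      ((n0, ([] : List String)) :: t).length p.1 := by
                  intro p hp hpne
                  have hmem : p.1 ∈ reachD ((n0, ([] : List String)) :: t) q.1 := by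
                    by_contra hnr
                    exact hD ⟨rfl, hE, p, hp, q, by rw [hfind]; rfl, hpne, hnr⟩
                  rw [reachD_eq_Dst] at hmem
                  exact (Dst_inv _ hnd q.1 _ p.1).1 hmem
                rw [hA, (B_true_iff _ q hfind hE).2 hconn]
        | cons b bs =>
            have hne' : (b :: bs) ≠ ([] : List String) := by simp
            have hq : ((n0, b :: bs) :: t).find? (fun p => !p.2.isEmpty) = some (n0, b :: bs) :=
              List.find?_cons_of_pos (by simp)
            refine bool_eq_of_iff ?_
            rw [A_true_iff_ne n0 (b :: bs) t hne' hnd,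
              B_true_iff ((n0, b :: bs) :: t) (n0, b :: bs) hq hE]
            constructor
            · exact fun h => h.1
            · exact fun h => ⟨h, hE⟩
      · rw [A_false_of_odd _ hnd hE, B_false_of_odd _ hE]

theorem main_tight (g : List (String × List String)) (hpre : Pre_is_eulerian g)
    (hD : D_is_eulerian g) : is_eulerian g ≠ is_eulerian_alt g := by
  obtain ⟨hne, hnd, -⟩ := hpre
  obtain ⟨hD1, hD2, hD3⟩ := hD
  cases g with
  | nil => exact absurd rfl hne
  | cons p t =>
      obtain ⟨n0, nbs0⟩ := p
      have hnbs0 : nbs0 = [] := by simpa using hD1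
      subst hnbs0
      have hA : is_eulerian ((n0, ([] : List String)) :: t) = true :=
        (A_true_iff_nil n0 t hnd).2 hD2
      obtain ⟨p, hp, q', hq', hpne', hpnr⟩ := hD3
      cases hfind : ((n0, ([] : List String)) :: t).find? (fun p => !p.2.isEmpty) with
      | none => rw [hfind] at hq'; simp at hq'
      | some q =>
          rw [hfind] at hq'
          have hq'' : q = q' := by simpa using hq'
          subst hq''
          have hnsat : ¬ satP ((n0, ([] : List String)) :: t) q.1
              ((n0, ([] : List String)) :: t).length p.1 := by
            intro hs
            apply hpnr
            rw [reachD_eq_Dst]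
            exact (Dst_inv _ hnd q.1 _ p.1).2 hs
          intro heq
          have hBt : is_eulerian_alt ((n0, ([] : List String)) :: t) = true := by
            rw [← heq, hA]
          exact hnsat ((B_true_iff _ q hfind hD2).1 hBt p hp hpne')

-- ===== VERDICT (by name: the statement is the Claim_ definition above) =====
theorem is_eulerian_spec : Claim_unchanged_is_eulerian := by
  intro graph _ hpre hD
  exact main_unchanged graph hpre hD
theorem is_eulerian_changed : Claim_changed_is_eulerian := by unfold Claim_changed_is_eulerian; decide
theorem is_eulerian_tight : Claim_exact_is_eulerian := by
  intro graph _ hpre hD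
  exact main_tight graph hpre hD
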